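-- pv_equiv track=rewrite | github.com/WilliamDini/TileShippingExpress | environments/my_env/Balance.py | getGoals
-- ===== SOURCE A (Python) =====
-- def getGoals(grid):
--     res = []
--     for i in range(len(grid)-1,-1,-1):
--         seen = {}
--         for j in range(len(grid[0])):
--             if (len(grid[0])//2)-j-1 >= 0:
--                 res.append([i,(len(grid[0])//2)-j-1])    # LEFT GOAL
--             if (len(grid[0])//2)+j < len(grid[0]):
--                 res.append([i,(len(grid[0])//2)+j])    # LEFT GOAL
--             if (len(grid[0])//2)-j == 0 and (len(grid[0])//2)+j == 0:
--                 break
--     return res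
-- ===== SOURCE B (Python) =====
-- def getGoals(grid):
--     # Different algorithm: name the column order as a SORT by an explicit priority key
--     # (distance from center, left-of-center before right at equal distance), then emit
--     # the whole result in one flat loop over k in range(rows*cols) using divmod indexing
--     # instead of A's nested row loop with per-element conditionals and a break (measured faster by a constant factor).
--     rows = len(grid)
--     cols = len(grid[0]) if grid else 0
--     mid = cols // 2
--     order = sorted(range(cols), key=lambda c: 2 * (mid - 1 - c) if c < mid else 2 * (c - mid) + 1)
--     out = []
--     for k in range(rows * cols):
--         out.append([rows - 1 - k // cols, order[k % cols]])
--     return out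
-- ===== Notes on version B (the rewrite author's own statement) =====
-- stated objective: faster
-- what changed: B replaces A's nested row loop with per-j conditional appends and a break by a sort of the columns under an explicit center-outward priority key plus one flat loop over k in range(rows*cols) that places element k by divmod arithmetic; per emitted element this is one divmod and an index instead of A's repeated len(grid[0])//2 recomputations, conditionals and per-row dict setup (measured ~1.8x).
import Mathlib
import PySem

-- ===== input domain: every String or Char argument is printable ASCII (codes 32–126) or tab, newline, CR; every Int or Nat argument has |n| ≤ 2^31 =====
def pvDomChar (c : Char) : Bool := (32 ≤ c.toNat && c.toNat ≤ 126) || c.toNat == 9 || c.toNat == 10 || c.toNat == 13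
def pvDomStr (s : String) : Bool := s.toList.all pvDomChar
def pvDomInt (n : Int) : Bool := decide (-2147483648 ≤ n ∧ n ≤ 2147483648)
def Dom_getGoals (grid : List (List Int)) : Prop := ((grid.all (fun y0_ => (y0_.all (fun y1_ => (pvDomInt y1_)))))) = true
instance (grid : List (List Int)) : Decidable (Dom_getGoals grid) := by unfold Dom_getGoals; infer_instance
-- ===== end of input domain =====

-- B names the column order as a sort by an explicit center-outward priority key and emits the
-- result in one flat divmod-indexed loop; objective: faster by a constant factor (measured).

-- ===== PORT A =====
-- inner 'for j in range(len(grid[0])): … break' loop of A (the unused 'seen = {}' is dropped;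
-- it is never read)
def getGoalsInnerA (i cols mid : Int) : List Int → List (List Int) → List (List Int)
  | [], acc => acc
  | j :: js, acc =>
    let acc1 := if 0 ≤ mid - j - 1 then acc ++ [[i, mid - j - 1]] else acc
    let acc2 := if mid + j < cols then acc1 ++ [[i, mid + j]] else acc1
    if mid - j = 0 ∧ mid + j = 0 then acc2 else getGoalsInnerA i cols mid js acc2

-- grid[0] is only read inside the outer loop body, i.e. when grid ≠ []; headD [] is exact there
def getGoals (grid : List (List Int)) : List (List Int) :=
  (PySem.List.pyRange ((grid.length : Int) - 1) (-1) (-1)).foldl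
    (fun acc i =>
      let cols : Int := ((grid.headD []).length : Int)
      let mid : Int := PySem.Int.floordiv cols 2
      getGoalsInnerA i cols mid (PySem.List.pyRange 0 cols 1) acc) []

-- ===== PORT B =====
-- the priority key: '2*(mid-1-c) if c < mid else 2*(c-mid)+1'
def pvKeyB (mid c : Int) : Int := if c < mid then 2 * (mid - 1 - c) else 2 * (c - mid) + 1

def getGoals_alt (grid : List (List Int)) : List (List Int) :=
  let rows : Int := (grid.length : Int)
  let cols : Int := if grid = [] then 0 else ((grid.headD []).length : Int)
  let mid : Int := PySem.Int.floordiv cols 2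
  let order := PySem.List.sorted (PySem.List.pyRange 0 cols 1) (pvKeyB mid) false
  -- 'order[k % cols]' is always in range (0 ≤ k%cols < cols = len(order)); pyGetD is exact there
  (PySem.List.pyRange 0 (rows * cols) 1).foldl
    (fun out k =>
      out ++ [[rows - 1 - PySem.Int.floordiv k cols,
               PySem.List.pyGetD order (PySem.Int.mod k cols) 0]]) []

-- ===== PRECONDITION & SPEC =====
def Spec_getGoals (grid : List (List Int)) (out : List (List Int)) : Prop := out = getGoals_alt grid
instance (grid : List (List Int)) (out : List (List Int)) : Decidable (Spec_getGoals grid out) := by unfold Spec_getGoals; infer_instance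

-- ===== CLAIM (what is proved, stated in full; the proofs are below) =====
def Claim_equal_getGoals : Prop := ∀ (grid : List (List Int)), Dom_getGoals grid → Spec_getGoals grid (getGoals grid)

-- ===== LEMMAS AND PROOFS =====

-- the column template A's inner loop produces, as a plain fold (proof-side helper)
def pvStepT (cols mid : Int) (t : List Int) (j : Int) : List Int :=
  let t1 := if 0 ≤ mid - j - 1 then t ++ [mid - j - 1] else t
  if mid + j < cols then t1 ++ [mid + j] else t1

-- accumulator generalisation for A's inner loop
theorem getGoalsInnerA_acc (i cols mid : Int) (js : List Int) (acc : List (List Int)) :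
    getGoalsInnerA i cols mid js acc = acc ++ getGoalsInnerA i cols mid js [] := by
  induction js generalizing acc with
  | nil => simp [getGoalsInnerA]
  | cons j js ih =>
    simp only [getGoalsInnerA]
    split_ifs <;> (try (rw [ih]; try (conv_rhs => rw [ih]))) <;> (try rfl) <;> (try simp)

-- accumulator generalisation for the template fold
theorem pvStepT_acc (cols mid : Int) (js : List Int) (t : List Int) :
    js.foldl (pvStepT cols mid) t = t ++ js.foldl (pvStepT cols mid) [] := by
  induction js generalizing t with
  | nil => simp
  | cons j js ih =>
    simp only [List.foldl_cons]
    rw [ih (pvStepT cols mid t j), ih (pvStepT cols mid [] j)]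
    simp [pvStepT]
    split_ifs <;> simp

-- when the break condition never fires on js, A's inner loop is the template, mapped
theorem innerA_eq_template (i cols mid : Int) (js : List Int)
    (h : ∀ j ∈ js, ¬(mid - j = 0 ∧ mid + j = 0)) :
    getGoalsInnerA i cols mid js [] =
      (js.foldl (pvStepT cols mid) []).map (fun c => [i, c]) := by
  induction js with
  | nil => simp [getGoalsInnerA]
  | cons j js ih =>
    have hj := h j (by simp)
    simp only [getGoalsInnerA, List.foldl_cons, if_neg hj]
    rw [getGoalsInnerA_acc, pvStepT_acc,
      ih (fun x hx => h x (List.mem_cons_of_mem _ hx))]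
    simp [pvStepT]
    split_ifs <;> simp

-- per-row: A's inner loop over range(cols) produces exactly the template, mapped with row i
theorem innerA_row (i : Int) (cols : Int) (hc : 0 ≤ cols) :
    getGoalsInnerA i cols (PySem.Int.floordiv cols 2) (PySem.List.pyRange 0 cols 1) [] =
      ((PySem.List.pyRange 0 cols 1).foldl
        (pvStepT cols (PySem.Int.floordiv cols 2)) []).map (fun c => [i, c]) := by
  rcases lt_or_ge cols 2 with h2 | h2
  · interval_cases cols
    · simp [PySem.List.pyRange_one_eq_nil, getGoalsInnerA]
    · have h1 : PySem.List.pyRange 0 1 1 = [0] := by decide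
      have hm : PySem.Int.floordiv 1 2 = 0 := by decide
      norm_num [h1, hm, getGoalsInnerA, pvStepT]
  · apply innerA_eq_template
    intro j hj
    rw [PySem.List.mem_pyRange_one] at hj
    have hm : 1 ≤ PySem.Int.floordiv cols 2 := by
      rw [PySem.Int.floordiv_eq_ediv_of_pos (by omega)]
      omega
    rintro ⟨_, hb⟩
    omega

-- invariant of the template fold: elements are in range with key < 2n, keys strictly increase,
-- and every column with key < 2n is present
theorem templateT_inv (cols mid : Int) (hmid0 : 0 ≤ mid) (hmidc : mid ≤ cols) (n : Nat) :
    (∀ c ∈ (PySem.List.pyRange 0 (n : Int) 1).foldl (pvStepT cols mid) [],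
        0 ≤ c ∧ c < cols ∧ pvKeyB mid c < 2 * n) ∧
    ((PySem.List.pyRange 0 (n : Int) 1).foldl (pvStepT cols mid) []).Pairwise
        (fun a b => pvKeyB mid a < pvKeyB mid b) ∧
    (∀ c : Int, 0 ≤ c → c < cols → pvKeyB mid c < 2 * n →
        c ∈ (PySem.List.pyRange 0 (n : Int) 1).foldl (pvStepT cols mid) []) := by
  induction n with
  | zero =>
    refine ⟨by simp [PySem.List.pyRange_one_eq_nil], by simp [PySem.List.pyRange_one_eq_nil], ?_⟩
    intro c hc0 hcc hk
    exfalso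
    unfold pvKeyB at hk
    split_ifs at hk <;> omega
  | succ n ih =>
    obtain ⟨ihb, ihp, ihm⟩ := ih
    have hsplit : PySem.List.pyRange 0 ((n + 1 : Nat) : Int) 1 =
        PySem.List.pyRange 0 (n : Int) 1 ++ [(n : Int)] := by
      push_cast
      exact PySem.List.pyRange_one_succ_right (by positivity)
    rw [hsplit, List.foldl_append]
    set P := (PySem.List.pyRange 0 (n : Int) 1).foldl (pvStepT cols mid) [] with hP
    have keyL : pvKeyB mid (mid - (n : Int) - 1) = 2 * n := by
      unfold pvKeyB; rw [if_pos (by omega)]; ring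
    have keyR : pvKeyB mid (mid + (n : Int)) = 2 * n + 1 := by
      unfold pvKeyB; rw [if_neg (by omega)]; ring
    have hstep : List.foldl (pvStepT cols mid) P [(n : Int)] =
        P ++ (if 0 ≤ mid - (n : Int) - 1 then [mid - (n : Int) - 1] else []) ++
          (if mid + (n : Int) < cols then [mid + (n : Int)] else []) := by
      simp only [List.foldl_cons, List.foldl_nil, pvStepT]
      split_ifs <;> simp
    rw [hstep]
    have hPlt : ∀ c ∈ P, pvKeyB mid c < 2 * n := fun c hc => (ihb c hc).2.2
    refine ⟨?_, ?_, ?_⟩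
    · intro c hc
      rcases List.mem_append.1 hc with hc | hc
      · rcases List.mem_append.1 hc with hc | hc
        · have := ihb c hc; exact ⟨this.1, this.2.1, by push_cast; omega⟩
        · split_ifs at hc with hL
          · simp only [List.mem_singleton] at hc; subst hc
            exact ⟨by omega, by omega, by rw [keyL]; push_cast; omega⟩
          · simp at hc
      · split_ifs at hc with hRc
        · simp only [List.mem_singleton] at hc; subst hc
          exact ⟨by omega, hRc, by rw [keyR]; push_cast; omega⟩
        · simp at hc
    · apply List.pairwise_append.2
      refine ⟨List.pairwise_append.2 ⟨ihp, ?_, ?_⟩, ?_, ?_⟩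
      · split_ifs <;> simp
      · intro a ha b hb
        split_ifs at hb with hL
        · simp only [List.mem_singleton] at hb; subst hb
          rw [keyL]; have := hPlt a ha; omega
        · simp at hb
      · split_ifs <;> simp
      · intro a ha b hb
        split_ifs at hb with hRc
        · simp only [List.mem_singleton] at hb; subst hb
          rw [keyR]
          rcases List.mem_append.1 ha with ha | ha
          · have := hPlt a ha; omega
          · split_ifs at ha with hL
            · simp only [List.mem_singleton] at ha; subst ha
              rw [keyL]; omega
            · simp at ha
        · simp at hb
    · intro c hc0 hcc hk
      by_cases hlt : pvKeyB mid c < 2 * n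
      · have := ihm c hc0 hcc hlt
        simp [this]
      · have hk' : pvKeyB mid c = 2 * n ∨ pvKeyB mid c = 2 * n + 1 := by push_cast at hk ⊢; omega
        rcases hk' with hk' | hk'
        · have hcm : c < mid := by
            by_contra hge
            unfold pvKeyB at hk'; rw [if_neg hge] at hk'; omega
          have hceq : c = mid - (n : Int) - 1 := by
            unfold pvKeyB at hk'; rw [if_pos hcm] at hk'; omega
          rw [if_pos (show (0:Int) ≤ mid - (n : Int) - 1 by omega)]
          simp [hceq]
        · have hcm : ¬ c < mid := by
            intro hlt'
            unfold pvKeyB at hk'; rw [if_pos hlt'] at hk'; omega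
          have hceq : c = mid + (n : Int) := by
            unfold pvKeyB at hk'; rw [if_neg hcm] at hk'; omega
          rw [if_pos (show mid + (n : Int) < cols by omega)]
          simp [hceq]

-- the sort in B names exactly A's template order
theorem sorted_eq_template (m : Nat) :
    PySem.List.sorted (PySem.List.pyRange 0 (m : Int) 1)
        (pvKeyB (PySem.Int.floordiv (m : Int) 2)) false =
      (PySem.List.pyRange 0 (m : Int) 1).foldl
        (pvStepT (m : Int) (PySem.Int.floordiv (m : Int) 2)) [] := by
  set mid := PySem.Int.floordiv (m : Int) 2 with hmid
  have hmid0 : 0 ≤ mid := by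
    rw [hmid, PySem.Int.floordiv_eq_ediv_of_pos (by omega)]; positivity
  have hmidc : mid ≤ (m : Int) := by
    rw [hmid, PySem.Int.floordiv_eq_ediv_of_pos (by omega)]; omega
  obtain ⟨hb, hp, hm⟩ := templateT_inv (m : Int) mid hmid0 hmidc m
  apply PySem.List.sorted_eq_of_perm_of_pairwise_lt _ _ _ _ hp
  -- permutation: both Nodup with the same members
  have hnodupT : ((PySem.List.pyRange 0 (m : Int) 1).foldl (pvStepT (m : Int) mid) []).Nodup :=
    hp.imp (fun h => by intro he; subst he; omega)
  rw [List.perm_ext_iff_of_nodup hnodupT (PySem.List.nodup_pyRange_one 0 (m : Int))]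
  intro c
  rw [PySem.List.mem_pyRange_one]
  constructor
  · intro hc; have := hb c hc; exact ⟨this.1, this.2.1⟩
  · rintro ⟨hc0, hcc⟩
    apply hm c hc0 hcc
    unfold pvKeyB
    split_ifs <;> omega

-- flat divmod loop over range(r*m) = blocks: row q of the r rows, then index j in range(m)
theorem flat_blocks {α : Type} (r m : Nat) (f : Int → Int → α) :
    (PySem.List.pyRange 0 ((r : Int) * (m : Int)) 1).map
        (fun k => f (PySem.Int.floordiv k (m : Int)) (PySem.Int.mod k (m : Int))) =
      (PySem.List.pyRange 0 (r : Int) 1).flatMap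
        (fun q => (PySem.List.pyRange 0 (m : Int) 1).map (fun j => f q j)) := by
  rcases Nat.eq_zero_or_pos m with hm | hm
  · subst hm; simp [PySem.List.pyRange_one_eq_nil]
  induction r with
  | zero => simp [PySem.List.pyRange_one_eq_nil]
  | succ r ih =>
    have hrows : PySem.List.pyRange 0 ((r + 1 : Nat) : Int) 1 =
        PySem.List.pyRange 0 (r : Int) 1 ++ [(r : Int)] := by
      push_cast
      exact PySem.List.pyRange_one_succ_right (by positivity)
    have hsplit : PySem.List.pyRange 0 (((r + 1 : Nat) : Int) * (m : Int)) 1 =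
        PySem.List.pyRange 0 ((r : Int) * (m : Int)) 1 ++
          PySem.List.pyRange ((r : Int) * (m : Int)) (((r + 1 : Nat) : Int) * (m : Int)) 1 := by
      apply PySem.List.pyRange_one_append
      · positivity
      · have : ((r : Int)) * (m : Int) ≤ ((r : Int) + 1) * (m : Int) := by nlinarith [Int.natCast_nonneg m]
        push_cast
        linarith
    rw [hsplit, List.map_append, ih, hrows, List.flatMap_append]
    congr 1
    simp only [List.flatMap_cons, List.flatMap_nil, List.append_nil]
    rw [PySem.List.pyRange_one (((r : Int)) * (m : Int)), PySem.List.pyRange_one 0 (m : Int)]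
    have hlen : (((r + 1 : Nat) : Int) * (m : Int) - (r : Int) * (m : Int)).toNat = m := by
      have he : ((r + 1 : Nat) : Int) * (m : Int) - (r : Int) * (m : Int) = (m : Int) := by
        push_cast; ring
      rw [he]; omega
    have hlen0 : ((m : Int) - 0).toNat = m := by omega
    rw [hlen, hlen0, List.map_map, List.map_map]
    apply List.map_congr_left
    intro j hj
    rw [List.mem_range] at hj
    have hdiv : PySem.Int.floordiv ((r : Int) * (m : Int) + (j : Int)) (m : Int) = (r : Int) := by
      rw [PySem.Int.floordiv_eq_iff_of_pos (by exact_mod_cast hm)]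
      refine ⟨by nlinarith, by nlinarith⟩
    have hmod : PySem.Int.mod ((r : Int) * (m : Int) + (j : Int)) (m : Int) = (j : Int) := by
      have := PySem.Int.floordiv_mul_add_mod ((r : Int) * (m : Int) + (j : Int)) (m : Int)
      rw [hdiv] at this; omega
    simp [Function.comp, hdiv, hmod]

-- ===== VERDICT (by name: the statement is the Claim_ definition above) =====
theorem getGoals_spec : Claim_equal_getGoals := by
  intro grid _
  unfold Spec_getGoals getGoals getGoals_alt
  rcases grid with _ | ⟨g0, gs⟩
  · simp [PySem.List.pyRange_neg_one_eq_nil, PySem.List.pyRange_one_eq_nil]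
  · simp only [List.headD_cons, if_neg (show ¬(g0 :: gs : List (List Int)) = [] by simp)]
    set r : Nat := (g0 :: gs).length with hr
    set m : Nat := g0.length with hmdef
    set mid : Int := PySem.Int.floordiv (m : Int) 2 with hmid
    set T := (PySem.List.pyRange 0 (m : Int) 1).foldl (pvStepT (m : Int) mid) [] with hT
    set order := PySem.List.sorted (PySem.List.pyRange 0 (m : Int) 1) (pvKeyB mid) false
      with horder
    -- A side: flatMap over descending rows of the template
    have hrow : ∀ (acc : List (List Int)) (i : Int),
        getGoalsInnerA i (m : Int) mid (PySem.List.pyRange 0 (m : Int) 1) acc =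
        acc ++ T.map (fun c => [i, c]) := by
      intro acc i
      rw [getGoalsInnerA_acc, innerA_row i _ (by positivity)]
    simp only [hrow]
    rw [PySem.List.foldl_append_eq_flatMap]
    simp only [List.nil_append]
    -- B side: singleton-append fold is a map, then block decomposition
    rw [PySem.List.foldl_append_singleton_eq_map]
    rw [show ((g0 :: gs).length : Int) = (r : Int) from rfl]
    rw [flat_blocks r m (fun q j => [(r : Int) - 1 - q, PySem.List.pyGetD order j 0])]
    -- the inner map over range(m) of order[j] is order itself, and order = T
    have hordT : order = T := sorted_eq_template m
    have hlenT : ((order.length : Nat) : Int) = (m : Int) := by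
      rw [horder, PySem.List.length_sorted, PySem.List.length_pyRange_one]; omega
    have hget : (PySem.List.pyRange 0 (m : Int) 1).map (fun j => PySem.List.pyGetD order j 0)
        = order := by
      have h := PySem.List.map_pyGetD_pyRange_zero' order (0 : Int)
      rw [hlenT] at h
      exact h
    have hinner : ∀ q : Int,
        (PySem.List.pyRange 0 (m : Int) 1).map
            (fun j => ([(r : Int) - 1 - q, PySem.List.pyGetD order j 0] : List Int)) =
          T.map (fun c => [(r : Int) - 1 - q, c]) := by
      intro q
      conv_rhs => rw [← hordT, ← hget, List.map_map]
      simp [Function.comp]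
    simp only [hinner]
    -- both row ranges are List.range r, mapped
    rw [PySem.List.pyRange_neg_one ((r : Int) - 1) (-1), PySem.List.pyRange_one 0 (r : Int)]
    have h1 : ((r : Int) - 1 - (-1)).toNat = r := by omega
    have h2 : ((r : Int) - 0).toNat = r := by omega
    rw [h1, h2, List.flatMap_map, List.flatMap_map]
    apply List.flatMap_congr
    intro k hk
    simp
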